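-- pv_equiv track=rewrite | github.com/saiyash006/M0ST.AI | security_modules/reverse_engineering/cfg_recovery/__init__.py | compute_predecessors
-- ===== SOURCE A (Python) =====
-- from typing import Any, Dict, List, Set, Tuple
--
-- def compute_predecessors(
--     block_addrs: List[int], edges: List[Tuple[int, int]]
-- ) -> Dict[int, List[int]]:
--     """Compute predecessor map."""
--     preds: Dict[int, List[int]] = {b: [] for b in block_addrs}
--     for src, dst in edges:
--         if dst in preds:
--             preds[dst].append(src)
--     return preds
-- ===== SOURCE B (Python) =====
-- from typing import Dict, List, Tuple
--
-- def compute_predecessors(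
--     block_addrs: List[int], edges: List[Tuple[int, int]]
-- ) -> Dict[int, List[int]]:
--     """Compute predecessor map."""
--     return {b: [src for src, dst in edges if dst == b] for b in block_addrs}
-- ===== Notes on version B (the rewrite author's own statement) =====
-- stated objective: simpler
-- what changed: Replaces A's mutable dict initialization plus a single pass appending edge sources with a one-line dict comprehension that, for each block, scans the edge list for edges pointing to it.
import Mathlib
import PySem

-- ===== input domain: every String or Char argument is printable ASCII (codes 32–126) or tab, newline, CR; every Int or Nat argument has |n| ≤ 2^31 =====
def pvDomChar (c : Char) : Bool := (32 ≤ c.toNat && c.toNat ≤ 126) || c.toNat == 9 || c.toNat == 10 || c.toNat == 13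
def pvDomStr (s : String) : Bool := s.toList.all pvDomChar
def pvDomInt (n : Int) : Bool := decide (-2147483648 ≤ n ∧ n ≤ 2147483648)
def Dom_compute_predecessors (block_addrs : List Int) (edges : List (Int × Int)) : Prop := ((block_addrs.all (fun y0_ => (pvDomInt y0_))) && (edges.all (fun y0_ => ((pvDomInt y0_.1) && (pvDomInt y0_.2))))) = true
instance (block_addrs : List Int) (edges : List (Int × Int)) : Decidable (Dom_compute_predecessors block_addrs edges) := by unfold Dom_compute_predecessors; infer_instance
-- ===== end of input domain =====

-- B replaces A's init-then-append dict loop with a per-block scan of the edge list (simpler one-line comprehension; not faster).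


-- ===== PORT A =====
def compute_predecessors (block_addrs : List Int) (edges : List (Int × Int)) : List (Int × List Int) :=
  let preds : PySem.Dict Int (List Int) :=
    block_addrs.foldl (fun d b => d.insert b ([] : List Int)) PySem.Dict.empty
  let preds :=
    edges.foldl (fun d e => if d.contains e.2 then d.modify e.2 [] (fun v => v ++ [e.1]) else d) preds
  preds.items

-- ===== PORT B =====
def compute_predecessors_alt (block_addrs : List Int) (edges : List (Int × Int)) : List (Int × List Int) :=
  (block_addrs.foldl
    (fun d b => d.insert b ((edges.filter (fun e => e.2 == b)).map (fun e => e.1)))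
    (PySem.Dict.empty : PySem.Dict Int (List Int))).items

-- ===== PRECONDITION & SPEC =====
def Spec_compute_predecessors (block_addrs : List Int) (edges : List (Int × Int)) (out : List (Int × List Int)) : Prop := out = compute_predecessors_alt block_addrs edges
instance (block_addrs : List Int) (edges : List (Int × Int)) (out : List (Int × List Int)) : Decidable (Spec_compute_predecessors block_addrs edges out) := by unfold Spec_compute_predecessors; infer_instance

-- ===== CLAIM (what is proved, stated in full; the proofs are below) =====
def Claim_equal_compute_predecessors : Prop := ∀ (block_addrs : List Int) (edges : List (Int × Int)), Dom_compute_predecessors block_addrs edges → Spec_compute_predecessors block_addrs edges (compute_predecessors block_addrs edges)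

-- ===== LEMMAS AND PROOFS =====

-- A's edge loop appends, to each existing entry, the sources of the edges targeting its key (keys unchanged).
theorem edgeLoop_items (edges : List (Int × Int)) (d : PySem.Dict Int (List Int))
    (hnd : d.keys.Nodup) :
    (edges.foldl (fun d e => if d.contains e.2 then d.modify e.2 [] (fun v => v ++ [e.1]) else d) d).items
      = d.items.map (fun p => (p.1, p.2 ++ ((edges.filter (fun e => e.2 == p.1)).map (fun e => e.1)))) := by
  induction edges generalizing d with
  | nil => simp
  | cons e rest ih =>
    simp only [List.foldl_cons]
    by_cases h : d.contains e.2 = true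
    · rw [if_pos h]
      have hnd' : (d.modify e.2 [] (fun v => v ++ [e.1])).keys.Nodup := by
        rw [PySem.Dict.keys_modify, PySem.Dict.keys_insert_of_contains _ _ h]
        exact hnd
      rw [ih _ hnd']
      have hitems : (d.modify e.2 [] (fun v => v ++ [e.1])).items
          = d.items.map (fun p => if p.1 == e.2 then (e.2, d.getD e.2 [] ++ [e.1]) else p) := by
        simp [PySem.Dict.modify, PySem.Dict.insert, h]
      rw [hitems, List.map_map]
      apply List.map_congr_left
      intro p hp
      by_cases hk : p.1 = e.2
      · have hmem : (e.2, p.2) ∈ d.items := by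
          have : p = (e.2, p.2) := by cases p; simp_all
          rwa [← this]
        have hget : d.getD e.2 [] = p.2 := PySem.Dict.getD_of_mem_items _ hmem hnd []
        simp [Function.comp, hk, hget]
      · simp [Function.comp, hk, Ne.symm hk]
    · rw [if_neg h]
      rw [ih _ hnd]
      apply List.map_congr_left
      intro p hp
      have hk : p.1 ≠ e.2 := by
        intro hEq
        apply h
        simp only [PySem.Dict.contains, List.any_eq_true]
        exact ⟨p, hp, by simp [hEq]⟩
      simp [Ne.symm hk]

-- folding inserts of F b over B's dict tracks folding inserts of [] over A's dict, itemwise.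
theorem initLoop_items (F : Int → List Int) (bs : List Int) (d1 d2 : PySem.Dict Int (List Int))
    (hrel : d2.items = d1.items.map (fun p => (p.1, p.2 ++ F p.1))) :
    (bs.foldl (fun d b => d.insert b (F b)) d2).items
      = (bs.foldl (fun d b => d.insert b ([] : List Int)) d1).items.map (fun p => (p.1, p.2 ++ F p.1)) := by
  induction bs generalizing d1 d2 with
  | nil => simpa using hrel
  | cons b rest ih =>
    simp only [List.foldl_cons]
    apply ih
    have hc : d2.contains b = d1.contains b := by
      simp [PySem.Dict.contains, hrel, List.any_map, Function.comp_def]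
    by_cases h : d1.contains b = true
    · simp only [PySem.Dict.insert, h, hc, if_pos, hrel, List.map_map]
      congr 1
      funext p
      by_cases hk : p.1 = b <;> simp [Function.comp, hk]
    · have h2 : d2.contains b = false := by rw [hc]; simpa using h
      simp [PySem.Dict.insert, h, h2, hrel]

-- ===== VERDICT (by name: the statement is the Claim_ definition above) =====
theorem compute_predecessors_spec : Claim_equal_compute_predecessors := by
  intro block_addrs edges _
  unfold Spec_compute_predecessors compute_predecessors compute_predecessors_alt
  have hnd : (block_addrs.foldl (fun d b => d.insert b ([] : List Int)) PySem.Dict.empty).keys.Nodup :=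
    PySem.Dict.nodup_keys_foldl_insert _ _ _ PySem.Dict.nodup_keys_empty
  rw [edgeLoop_items edges _ hnd,
      initLoop_items (fun b => (edges.filter (fun e => e.2 == b)).map (fun e => e.1)) block_addrs
        PySem.Dict.empty PySem.Dict.empty (by simp [PySem.Dict.empty])]
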